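-- pv_equiv track=rewrite | github.com/ptarau/Tree-based-Arithmetic-Systems-in-Python | treenums/bbin.py | bsplit
-- ===== SOURCE A (Python) =====
-- def get_bdigit(b, n):
--     assert n > 0 and b > 0
--     q = n // b
--     d = n % b
--     if d == 0:
--         return b - 1, q - 1
--     return d - 1, q
--
-- def put_bdigit(b, d, m):
--     assert 0 <= d < b
--     return 1 + d + b * m
--
-- def to_bbase(b, n):
--     ds = []
--     while n > 0:
--         d, n = get_bdigit(b, n)
--         ds.append(d)
--     return ds
--
-- def from_bbase(b, ds):
--     n = 0
--     for d in reversed(ds):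
--         n = put_bdigit(b, d, n)
--     return n
--
-- def bsplit(k, n):
--     xs = to_bbase(k + 1, n-1)
--     rs = []
--     ns = []
--     for x in xs:
--         if x == k:
--             r = from_bbase(k, ns)
--             rs.append(r)
--             ns = []
--         else:
--             ns.append(x)
--
--     r = from_bbase(k, ns)
--     rs.append(r)
--     return rs
-- ===== SOURCE B (Python) =====
-- def bsplit(k, n):
--     b = k + 1
--     m = n - 1
--     rs = []
--     seg = 0
--     place = 1
--     while m > 0:
--         d = m % b
--         q = m // b
--         if d == 0:
--             d, m = b - 1, q - 1
--         else:
--             d, m = d - 1, q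
--         if d == k:
--             rs.append(seg)
--             seg = 0
--             place = 1
--         else:
--             seg += (d + 1) * place
--             place *= k
--     rs.append(seg)
--     return rs
-- ===== Notes on version B (the rewrite author's own statement) =====
-- stated objective: alternative
-- what changed: B replaces A's three-phase pipeline (build the full bijective base-(k+1) digit list, split it on delimiter digits, rebuild each segment with a reversed Horner fold) by a single streaming while-loop that extracts one digit at a time and accumulates each segment's value forward with a running place value, keeping no intermediate digit lists.
-- outside the precondition, e.g. on bsplit(-1, 3): A raises AssertionError, B raises ZeroDivisionError; on bsplit(-2, 3): A raises AssertionError, B returns [0, 0]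
import Mathlib
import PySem

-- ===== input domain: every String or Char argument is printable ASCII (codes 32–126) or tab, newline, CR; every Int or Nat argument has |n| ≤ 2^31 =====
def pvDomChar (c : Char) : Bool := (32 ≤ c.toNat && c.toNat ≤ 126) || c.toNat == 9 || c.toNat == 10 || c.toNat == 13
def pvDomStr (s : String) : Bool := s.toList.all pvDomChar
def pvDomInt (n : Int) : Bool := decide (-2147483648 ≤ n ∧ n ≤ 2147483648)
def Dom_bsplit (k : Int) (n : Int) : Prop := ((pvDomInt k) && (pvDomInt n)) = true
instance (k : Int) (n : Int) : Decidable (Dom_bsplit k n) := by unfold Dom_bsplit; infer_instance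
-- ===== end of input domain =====

-- B fuses A's digit-list construction and per-segment reversed-Horner rebuild into one
-- streaming pass with forward positional accumulation (objective: alternative decomposition).

-- ===== PORT A =====
-- get_bdigit(b, n) (its asserts hold on every call reached under Pre_)
def getBdigit (b : Int) (n : Int) : Int × Int :=
  let q := PySem.Int.floordiv n b
  let d := PySem.Int.mod n b
  if d = 0 then (b - 1, q - 1) else (d - 1, q)

-- to_bbase's while loop; fuel n.toNat suffices since each step with b ≥ 1 decreases n by ≥ 1
def toBbaseGo (b : Int) : Nat → Int → List Int
  | 0, _ => []
  | Nat.succ f, n =>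
    if n > 0 then
      let p := getBdigit b n
      p.1 :: toBbaseGo b f p.2
    else []

def toBbase (b : Int) (n : Int) : List Int := toBbaseGo b n.toNat n

-- from_bbase: fold of put_bdigit over reversed(ds)
def fromBbase (b : Int) (ds : List Int) : Int :=
  ds.reverse.foldl (fun n d => 1 + d + b * n) 0

def bsplit (k : Int) (n : Int) : List Int :=
  let xs := toBbase (k + 1) (n - 1)
  let st := xs.foldl
    (fun (st : List Int × List Int) x =>
      if x = k then (st.1 ++ [fromBbase k st.2], []) else (st.1, st.2 ++ [x]))
    ([], [])
  st.1 ++ [fromBbase k st.2]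

-- ===== PORT B =====
-- the single while loop of Source B; fuel (n-1).toNat suffices for the same reason as in A
def bsplitAltGo (b : Int) (k : Int) : Nat → Int → Int → Int → List Int → List Int
  | 0, _, seg, _, rs => rs ++ [seg]
  | Nat.succ f, m, seg, place, rs =>
    if m > 0 then
      let d0 := PySem.Int.mod m b
      let q := PySem.Int.floordiv m b
      let p := if d0 = 0 then (b - 1, q - 1) else (d0 - 1, q)
      if p.1 = k then bsplitAltGo b k f p.2 0 1 (rs ++ [seg])
      else bsplitAltGo b k f p.2 (seg + (p.1 + 1) * place) (place * k) rs
    else rs ++ [seg]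

def bsplit_alt (k : Int) (n : Int) : List Int :=
  bsplitAltGo (k + 1) k (n - 1).toNat (n - 1) 0 1 []

-- ===== PRECONDITION & SPEC =====
-- Pre_ excludes exactly the inputs where A raises AssertionError: k ≤ -1 with n ≥ 2
-- makes to_bbase call get_bdigit with base k+1 ≤ 0, failing its 'b > 0' assert.
def Pre_bsplit (k : Int) (n : Int) : Prop := 0 ≤ k ∨ n ≤ 1
instance (k : Int) (n : Int) : Decidable (Pre_bsplit k n) := by unfold Pre_bsplit; infer_instance
def pvWitness_bsplit : Int × Int := (2, 10)

def Spec_bsplit (k : Int) (n : Int) (out : List Int) : Prop := out = bsplit_alt k n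
instance (k : Int) (n : Int) (out : List Int) : Decidable (Spec_bsplit k n out) := by unfold Spec_bsplit; infer_instance

-- ===== CLAIM (what is proved, stated in full; the proofs are below) =====
def Claim_equal_bsplit : Prop := ∀ (k : Int) (n : Int), Dom_bsplit k n → Pre_bsplit k n → Spec_bsplit k n (bsplit k n)

-- ===== LEMMAS AND PROOFS =====

-- proof-side view of B's loop: processing an explicit digit list
def procB (k : Int) : List Int → Int → Int → List Int → List Int
  | [], seg, _, rs => rs ++ [seg]
  | d :: ds, seg, place, rs =>
    if d = k then procB k ds 0 1 (rs ++ [seg])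
    else procB k ds (seg + (d + 1) * place) (place * k) rs

-- B's fused loop equals extracting digits (same remapping as A) then processing them
theorem bsplitAltGo_eq_procB (b k : Int) :
    ∀ (fuel : Nat) (m seg place : Int) (rs : List Int),
      bsplitAltGo b k fuel m seg place rs = procB k (toBbaseGo b fuel m) seg place rs := by
  intro fuel
  induction fuel with
  | zero => intro m seg place rs; simp [bsplitAltGo, toBbaseGo, procB]
  | succ f ih =>
    intro m seg place rs
    by_cases hm : m > 0
    · by_cases hd : PySem.Int.mod m b = 0
      · simp [bsplitAltGo, toBbaseGo, getBdigit, if_pos hm, if_pos hd, procB, ih]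
      · simp [bsplitAltGo, toBbaseGo, getBdigit, if_pos hm, if_neg hd, procB, ih]
    · simp [bsplitAltGo, toBbaseGo, if_neg hm, procB]

-- fromBbase as a foldr (Horner over the reversed list = foldr)
theorem fromBbase_foldr (b : Int) (ds : List Int) :
    fromBbase b ds = ds.foldr (fun d n => 1 + d + b * n) 0 := by
  simp [fromBbase, List.foldl_reverse]

theorem foldr_horner_linear (k c : Int) (ds : List Int) :
    ds.foldr (fun d n => 1 + d + k * n) c
      = ds.foldr (fun d n => 1 + d + k * n) 0 + c * k ^ ds.length := by
  induction ds with
  | nil => simp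
  | cons d ds ih => simp [ih]; ring

theorem fromBbase_append (k : Int) (ns : List Int) (d : Int) :
    fromBbase k (ns ++ [d]) = fromBbase k ns + (d + 1) * k ^ ns.length := by
  rw [fromBbase_foldr, fromBbase_foldr, List.foldr_append]
  simp only [List.foldr]
  rw [foldr_horner_linear]
  congr 1
  ring

-- the invariant: seg = value of the pending segment, place = k ^ (its length)
theorem procB_eq_fold (k : Int) :
    ∀ (ds ns rs : List Int),
      procB k ds (fromBbase k ns) (k ^ ns.length) rs
        = (let st := ds.foldl
            (fun (st : List Int × List Int) x =>
              if x = k then (st.1 ++ [fromBbase k st.2], []) else (st.1, st.2 ++ [x]))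
            (rs, ns)
           st.1 ++ [fromBbase k st.2]) := by
  intro ds
  induction ds with
  | nil => intro ns rs; simp [procB]
  | cons d ds ih =>
    intro ns rs
    simp only [procB, List.foldl_cons]
    by_cases hd : d = k
    · rw [if_pos hd, if_pos hd]
      have h := ih [] (rs ++ [fromBbase k ns])
      simpa [fromBbase] using h
    · rw [if_neg hd, if_neg hd]
      have h := ih (ns ++ [d]) rs
      rw [fromBbase_append] at h
      simpa [pow_succ] using h

-- ===== VERDICT (by name: the statement is the Claim_ definition above) =====
theorem bsplit_spec : Claim_equal_bsplit := by
  intro k n _ _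
  unfold Spec_bsplit bsplit bsplit_alt toBbase
  rw [bsplitAltGo_eq_procB]
  have h0 : (0 : Int) = fromBbase k [] := by simp [fromBbase]
  have h1 : (1 : Int) = k ^ ([] : List Int).length := by simp
  rw [h0, h1, procB_eq_fold]
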